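-- pv_equiv track=rewrite | github.com/query-loop/TalentFlow | server/app/routers/pipelines.py | _ensure_single_active
-- ===== SOURCE A (Python) =====
-- from typing import List, Optional, Dict
--
-- def _ensure_single_active(statuses: Dict[str, str]) -> Dict[str, str]:
--     order = ["extract","generate","keywords","ats","export","save"]
--     out = dict(statuses)
--     first_pending = next((k for k in order if out.get(k) != "complete"), None)
--     for k in order:
--         out[k] = "complete" if out.get(k) == "complete" else "pending"
--     if first_pending:
--         out[first_pending] = "active"
--     return out
-- ===== SOURCE B (Python) =====
-- def _ensure_single_active(statuses):
--     order = ["extract", "generate", "keywords", "ats", "export", "save"]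
--     out = dict(statuses)
--     assigned = False
--     for k in order:
--         if out.get(k) == "complete":
--             out[k] = "complete"
--         elif not assigned:
--             out[k] = "active"
--             assigned = True
--         else:
--             out[k] = "pending"
--     return out
-- ===== Notes on version B (the rewrite author's own statement) =====
-- stated objective: simpler
-- what changed: Replaces A's two sequential passes (a next() scan for the first pending stage, then a normalization loop, then a final patch of that key) with one pass that threads an 'assigned' flag and writes complete/active/pending directly.
import Mathlib
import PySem

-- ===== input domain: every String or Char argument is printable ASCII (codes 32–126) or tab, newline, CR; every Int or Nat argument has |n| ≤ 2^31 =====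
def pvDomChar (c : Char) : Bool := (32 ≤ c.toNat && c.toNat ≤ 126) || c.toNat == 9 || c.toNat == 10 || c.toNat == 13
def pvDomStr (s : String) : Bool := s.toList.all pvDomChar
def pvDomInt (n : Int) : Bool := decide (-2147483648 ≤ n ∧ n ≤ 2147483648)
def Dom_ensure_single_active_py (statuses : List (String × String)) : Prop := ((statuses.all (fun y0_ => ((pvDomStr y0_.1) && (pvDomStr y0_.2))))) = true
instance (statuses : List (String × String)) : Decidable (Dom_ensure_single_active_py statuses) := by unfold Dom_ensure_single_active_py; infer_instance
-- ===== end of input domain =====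

-- B replaces A's scan-then-rewrite-then-patch (next() for the first pending key, a
-- normalization loop, a final patch to "active") with a single pass threading an
-- 'assigned' flag; objective: simpler. Both ports return the dict as its items list.

-- ===== PORT A =====
-- order = ["extract","generate","keywords","ats","export","save"]
def pvOrder : List String := ["extract", "generate", "keywords", "ats", "export", "save"]

-- the body of A's normalization loop: out[k] = "complete" if out.get(k) == "complete" else "pending"
def pvStepA (d : PySem.Dict String String) (k : String) : PySem.Dict String String :=
  d.insert k (if d.get? k == some "complete" then "complete" else "pending")

def ensure_single_active_py (statuses : List (String × String)) : List (String × String) :=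
  let out := PySem.Dict.ofList statuses
  -- first_pending = next((k for k in order if out.get(k) != "complete"), None)
  let first_pending := pvOrder.find? (fun k => !(out.get? k == some "complete"))
  let out2 := pvOrder.foldl pvStepA out
  -- 'if first_pending:' — every element of order is a nonempty string, so truthiness = 'is not None'
  match first_pending with
  | some k => (out2.insert k "active").items
  | none => out2.items

-- ===== PORT B =====
-- the body of B's single loop, threading the dict and the 'assigned' flag
def pvStepB (p : PySem.Dict String String × Bool) (k : String) :
    PySem.Dict String String × Bool :=
  if p.1.get? k == some "complete" then (p.1.insert k "complete", p.2)
  else if p.2 = false then (p.1.insert k "active", true)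
  else (p.1.insert k "pending", p.2)

def ensure_single_active_py_alt (statuses : List (String × String)) : List (String × String) :=
  (pvOrder.foldl pvStepB (PySem.Dict.ofList statuses, false)).1.items

-- ===== PRECONDITION & SPEC =====
def Spec_ensure_single_active_py (statuses : List (String × String)) (out : List (String × String)) : Prop := out = ensure_single_active_py_alt statuses
instance (statuses : List (String × String)) (out : List (String × String)) : Decidable (Spec_ensure_single_active_py statuses out) := by unfold Spec_ensure_single_active_py; infer_instance

-- ===== CLAIM (what is proved, stated in full; the proofs are below) =====
def Claim_equal_ensure_single_active_py : Prop := ∀ (statuses : List (String × String)), Dom_ensure_single_active_py statuses → Spec_ensure_single_active_py statuses (ensure_single_active_py statuses)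

-- ===== LEMMAS AND PROOFS =====

-- mapping the value-replacement at key a over the items does not change key membership
theorem pv_any_map {κ ν : Type} [BEq κ] [LawfulBEq κ]
    (l : List (κ × ν)) (k a : κ) (u : ν) :
    ((l.map (fun p => if (p.1 == a) = true then (a, u) else p)).any (fun p => p.1 == k))
      = l.any (fun p => p.1 == k) := by
  induction l with
  | nil => rfl
  | cons p rest ih =>
    by_cases hp : p.1 = a <;> simp [hp, ih]

-- inserting at a key distinct from k does not change whether k is a key
theorem pv_contains_insert_of_ne {κ ν : Type} [BEq κ] [LawfulBEq κ]
    (d : PySem.Dict κ ν) (k a : κ) (v : ν) (h : k ≠ a) :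
    (d.insert a v).contains k = d.contains k := by
  simp only [PySem.Dict.insert]
  split
  · exact pv_any_map d.items k a v
  · simp [PySem.Dict.contains, Ne.symm h]

-- two inserts at distinct keys commute as ITEMS lists, provided k is already a key
theorem pv_insert_comm_of_contains {κ ν : Type} [BEq κ] [LawfulBEq κ]
    (d : PySem.Dict κ ν) (k a : κ) (v u : ν) (h : k ≠ a) (hk : d.contains k = true) :
    (d.insert a u).insert k v = (d.insert k v).insert a u := by
  have hk0 : (d.items.any (fun p => p.1 == k)) = true := hk
  have e2 : d.insert k v
      = PySem.Dict.mk (d.items.map (fun p => if (p.1 == k) = true then (k, v) else p)) := by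
    simp [PySem.Dict.insert, hk]
  by_cases hca : d.contains a = true
  · have e1 : d.insert a u
        = PySem.Dict.mk (d.items.map (fun p => if (p.1 == a) = true then (a, u) else p)) := by
      simp [PySem.Dict.insert, hca]
    have c1 : (d.insert a u).contains k = true := by
      rw [pv_contains_insert_of_ne d k a u h]; exact hk
    have c2 : (d.insert k v).contains a = true := by
      rw [pv_contains_insert_of_ne d a k v (Ne.symm h)]; exact hca
    rw [e1] at c1; rw [e2] at c2
    rw [e1, e2]
    simp only [PySem.Dict.insert, c1, c2, if_true]
    simp only [List.map_map]
    congr 1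
    apply List.map_congr_left
    intro p _
    by_cases hp : p.1 = a <;> by_cases hq : p.1 = k <;>
      simp_all [Function.comp, Ne.symm h]
  · have e1 : d.insert a u = PySem.Dict.mk (d.items ++ [(a, u)]) := by
      simp [PySem.Dict.insert, hca]
    have c1 : (d.insert a u).contains k = true := by
      rw [pv_contains_insert_of_ne d k a u h]; exact hk
    have c2 : (d.insert k v).contains a = false := by
      rw [pv_contains_insert_of_ne d a k v (Ne.symm h)]; exact (Bool.not_eq_true _).mp hca
    rw [e1] at c1; rw [e2] at c2
    rw [e1, e2]
    simp only [PySem.Dict.insert, c1, c2, if_true]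
    simp only [List.map_append, List.map_cons, List.map_nil]
    simp [Ne.symm h]

-- pushing a rewrite of an existing key k through A's loop over keys avoiding k
theorem pv_push_insert (ks : List String) (d : PySem.Dict String String) (k w : String)
    (hk : k ∉ ks) (hc : d.contains k = true) :
    (ks.foldl pvStepA d).insert k w = ks.foldl pvStepA (d.insert k w) := by
  induction ks generalizing d with
  | nil => rfl
  | cons a rest ih =>
    have hne : k ≠ a := fun h => hk (h ▸ List.mem_cons_self)
    have hkr : k ∉ rest := fun h => hk (List.mem_cons_of_mem a h)
    simp only [List.foldl_cons]
    rw [ih (pvStepA d a) hkr (by rw [pvStepA, pv_contains_insert_of_ne d k a _ hne]; exact hc)]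
    congr 1
    simp only [pvStepA, PySem.Dict.get?_insert_of_ne d _ (Ne.symm hne)]
    exact pv_insert_comm_of_contains d k a _ _ hne hc

-- once the flag is set, B's loop is exactly A's normalization loop
theorem pv_foldB_true (ks : List String) (d : PySem.Dict String String) :
    ks.foldl pvStepB (d, true) = (ks.foldl pvStepA d, true) := by
  induction ks generalizing d with
  | nil => rfl
  | cons a rest ih =>
    simp only [List.foldl_cons, pvStepB, pvStepA]
    by_cases h : d.get? a == some "complete" <;> simp [h, ih]

-- the predicate of A's next(...) scan is insensitive to inserts at other keys
theorem pv_find_congr (ks : List String) (d : PySem.Dict String String) (k v : String)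
    (hk : k ∉ ks) :
    ks.find? (fun x => !((d.insert k v).get? x == some "complete"))
      = ks.find? (fun x => !(d.get? x == some "complete")) := by
  induction ks with
  | nil => rfl
  | cons a rest ih =>
    have hne : a ≠ k := fun h => hk (h ▸ List.mem_cons_self)
    simp only [List.find?_cons, PySem.Dict.get?_insert_of_ne d v hne]
    split
    · rfl
    · exact ih (fun h => hk (List.mem_cons_of_mem a h))

-- main invariant: A's scan + loop + patch equals B's flagged loop, for distinct keys
theorem pv_main (ks : List String) (d : PySem.Dict String String) (hnd : ks.Nodup) :
    (match ks.find? (fun x => !(d.get? x == some "complete")) with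
      | some k => (ks.foldl pvStepA d).insert k "active"
      | none => ks.foldl pvStepA d)
      = (ks.foldl pvStepB (d, false)).1 := by
  induction ks generalizing d with
  | nil => rfl
  | cons a rest ih =>
    have hak : a ∉ rest := (List.nodup_cons.mp hnd).1
    have hr : rest.Nodup := (List.nodup_cons.mp hnd).2
    by_cases h : d.get? a == some "complete"
    · simp only [List.find?_cons, h, Bool.not_true, List.foldl_cons]
      have hstep : pvStepA d a = d.insert a "complete" := by simp [pvStepA, h]
      have hB : pvStepB (d, false) a = (d.insert a "complete", false) := by simp [pvStepB, h]
      rw [hstep, hB, ← pv_find_congr rest d a "complete" hak]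
      exact ih (d.insert a "complete") hr
    · simp only [List.find?_cons, h, Bool.not_false, List.foldl_cons]
      have hstep : pvStepA d a = d.insert a "pending" := by simp [pvStepA, h]
      have hB : pvStepB (d, false) a = (d.insert a "active", true) := by simp [pvStepB, h]
      rw [hstep, hB, pv_foldB_true,
        pv_push_insert rest (d.insert a "pending") a "active" hak
          (PySem.Dict.contains_insert_self d a "pending"),
        PySem.Dict.insert_insert_self]

theorem pv_order_nodup : pvOrder.Nodup := by decide

-- ===== VERDICT (by name: the statement is the Claim_ definition above) =====
theorem ensure_single_active_py_spec : Claim_equal_ensure_single_active_py := by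
  intro statuses _
  unfold Spec_ensure_single_active_py ensure_single_active_py ensure_single_active_py_alt
  rw [← pv_main pvOrder (PySem.Dict.ofList statuses) pv_order_nodup]
  cases hf : pvOrder.find? (fun x => !((PySem.Dict.ofList statuses).get? x == some "complete")) <;>
    simp only [hf]
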